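-- pv_equiv track=rewrite | github.com/haloooo/MOS | MfcOpeSys/models/models_sntracert.py | set_sntracert_wip
-- ===== SOURCE A (Python) =====
-- def set_sntracert_wip(resultArr):
--     result = resultArr
--     last_ok = 0
--     index = 0
--     for row in result:
--         if index == 0:
--             row['wip'] = 0
--         else:
--             row['wip'] = last_ok - row['input']
--         last_ok = row['ok']
--         index = index + 1
--     return result
-- ===== SOURCE B (Python) =====
-- def set_sntracert_wip(resultArr):
--     # Columnar/staged computation: extract the 'ok' and 'input' columns from the
--     # pristine rows, compute the whole wip column at once, then write it back in
--     # one final pass. Mutates the rows in place, like the original.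
--     oks = [row['ok'] for row in resultArr]
--     inputs = [row['input'] for row in resultArr[1:]]
--     wips = [0] + [o - i for o, i in zip(oks, inputs)]
--     for row, w in zip(resultArr, wips):
--         row['wip'] = w
--     return resultArr
-- ===== Notes on version B (the rewrite author's own statement) =====
-- stated objective: alternative
-- what changed: Replaces A's single stateful in-place pass (threading a last_ok accumulator and an index counter) with a columnar computation: extract the ok and input columns, compute the whole wip column by zipping the ok column against the shifted input column, then write it back in a separate pass.
import Mathlib
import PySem

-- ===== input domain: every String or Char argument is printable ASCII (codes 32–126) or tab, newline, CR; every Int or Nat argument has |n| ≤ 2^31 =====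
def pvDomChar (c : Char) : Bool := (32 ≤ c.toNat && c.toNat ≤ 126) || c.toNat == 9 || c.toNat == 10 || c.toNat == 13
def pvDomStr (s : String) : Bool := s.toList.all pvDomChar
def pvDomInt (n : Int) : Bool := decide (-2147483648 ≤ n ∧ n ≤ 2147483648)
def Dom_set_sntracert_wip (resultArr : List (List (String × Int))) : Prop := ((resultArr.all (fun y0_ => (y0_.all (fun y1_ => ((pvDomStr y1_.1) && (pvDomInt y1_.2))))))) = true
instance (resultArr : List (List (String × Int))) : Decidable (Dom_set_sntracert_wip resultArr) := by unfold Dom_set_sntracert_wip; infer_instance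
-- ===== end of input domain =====

-- B replaces A's single stateful in-place pass (last_ok accumulator + index counter) by a
-- columnar computation: extract the ok and input columns, compute the whole wip column by a
-- zip, then write it back in a separate pass. Both Pythons mutate the rows in place; the
-- equivalence proved here is about the return value.

-- ===== PORT A =====
-- A's loop: state (last_ok, index); row['input'] / row['ok'] port as getD _ 0 — Pre_ excludes
-- the missing-key inputs, where the Python raises KeyError.
def aLoop (lastOk idx : Int) : List (List (String × Int)) → List (List (String × Int))
  | [] => []
  | row :: rest =>
    let d := PySem.Dict.ofList row
    let d' := if idx == 0 then d.insert "wip" 0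
              else d.insert "wip" (lastOk - d.getD "input" 0)
    d'.items :: aLoop (d'.getD "ok" 0) (idx + 1) rest

def set_sntracert_wip (resultArr : List (List (String × Int))) : List (List (String × Int)) :=
  aLoop 0 0 resultArr

-- ===== PORT B =====
-- B: oks column, inputs column of resultArr[1:], wip column 0 :: (oks zip inputs mapped to o-i),
-- then a write-back pass over zip(resultArr, wips).
def set_sntracert_wip_alt (resultArr : List (List (String × Int))) : List (List (String × Int)) :=
  let oks := resultArr.map (fun row => (PySem.Dict.ofList row).getD "ok" 0)
  let inputs := (PySem.List.slice resultArr (some 1) none).map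
      (fun row => (PySem.Dict.ofList row).getD "input" 0)
  let wips := 0 :: (oks.zip inputs).map (fun p => p.1 - p.2)
  (resultArr.zip wips).map (fun p => ((PySem.Dict.ofList p.1).insert "wip" p.2).items)

-- ===== PRECONDITION & SPEC =====
-- Pre_: exactly where the Python A returns: every row has key 'ok' and every row after the
-- first has key 'input' (A reads row['ok'] on every row, row['input'] from the second row on;
-- a missing key raises KeyError).
def Pre_set_sntracert_wip (resultArr : List (List (String × Int))) : Prop :=
  (∀ row ∈ resultArr, (PySem.Dict.ofList row).contains "ok" = true) ∧
  (∀ row ∈ resultArr.tail, (PySem.Dict.ofList row).contains "input" = true)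
instance (resultArr : List (List (String × Int))) : Decidable (Pre_set_sntracert_wip resultArr) := by
  unfold Pre_set_sntracert_wip; infer_instance

def pvWitness_set_sntracert_wip : (List (List (String × Int))) :=
  [[("ok", 5), ("input", 1)], [("ok", 3), ("input", 2)]]

def Spec_set_sntracert_wip (resultArr : List (List (String × Int))) (out : List (List (String × Int))) : Prop := out = set_sntracert_wip_alt resultArr
instance (resultArr : List (List (String × Int))) (out : List (List (String × Int))) : Decidable (Spec_set_sntracert_wip resultArr out) := by unfold Spec_set_sntracert_wip; infer_instance

-- ===== CLAIM =====
def Claim_equal_set_sntracert_wip : Prop := ∀ (resultArr : List (List (String × Int))), Dom_set_sntracert_wip resultArr → Pre_set_sntracert_wip resultArr → Spec_set_sntracert_wip resultArr (set_sntracert_wip resultArr)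

-- ===== LEMMAS AND PROOFS =====

-- Inserting 'wip' does not change the 'ok' value A reads next.
theorem getD_ok_insert_wip (d : PySem.Dict String Int) (v : Int) :
    (d.insert "wip" v).getD "ok" 0 = d.getD "ok" 0 := by
  rw [PySem.Dict.getD_insert]; simp

-- From row 1 on, A's loop with last_ok = lastOk equals B's zip of rest against the wip column
-- built from lastOk :: (ok column of rest) and the input column of rest.
theorem aLoop_eq_zip (rest : List (List (String × Int))) (lastOk idx : Int) (h : 1 ≤ idx) :
    aLoop lastOk idx rest =
      (rest.zip (((lastOk :: rest.map (fun row => (PySem.Dict.ofList row).getD "ok" 0)).zip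
          (rest.map (fun row => (PySem.Dict.ofList row).getD "input" 0))).map
            (fun p => p.1 - p.2))).map
        (fun p => ((PySem.Dict.ofList p.1).insert "wip" p.2).items) := by
  induction rest generalizing lastOk idx with
  | nil => simp [aLoop]
  | cons row rest ih =>
    have hne : (idx == 0) = false := by simp; omega
    simp only [aLoop, hne, Bool.false_eq_true, if_false, List.map_cons, List.zip_cons_cons]
    refine congrArg (_ :: ·) ?_
    rw [getD_ok_insert_wip]
    exact ih _ (idx + 1) (by omega)

-- ===== VERDICT =====
theorem set_sntracert_wip_spec : Claim_equal_set_sntracert_wip := by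
  intro resultArr _ _
  unfold Spec_set_sntracert_wip set_sntracert_wip set_sntracert_wip_alt
  cases resultArr with
  | nil => simp [aLoop]
  | cons r0 rest =>
    rw [PySem.List.slice_from_one]
    simp only [List.tail_cons, List.map_cons, List.zip_cons_cons, List.map]
    simp only [aLoop, if_pos (by decide : ((0 : Int) == 0) = true)]
    refine congrArg (_ :: ·) ?_
    rw [getD_ok_insert_wip]
    exact aLoop_eq_zip rest _ 1 (by omega)
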